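-- pv_equiv track=rewrite | github.com/jk-jung/problem-solving | codewars/6kyu/6_Square string tops.py | tops
-- ===== SOURCE A (Python) =====
-- def tops(msg):
--     r, p = [], 0
--     for i in range(2, 10000000):
--         s = p + i + i - 2
--         r.append(msg[s:s + i])
--         if not r[-1]: break
--         p += i * 4 - 3
--     return ''.join(r[::-1])
-- ===== SOURCE B (Python) =====
-- def tops(msg):
--     out = ""
--     seg = ""
--     j = 2          # current ring; ring j's top segment starts at s = 2*j*j - 3*j
--     s = 2          # (the spiral's ring budget is rings 2..9999999, as in range(2, 10000000))
--     for p, c in enumerate(msg):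
--         if p >= s and j < 10000000:
--             seg += c
--             if p == s + j - 1:   # segment complete: prepend it
--                 out = seg + out
--                 seg = ""
--                 j += 1
--                 s += 4 * j - 5
--     return seg + out
-- ===== Notes on version B (the rewrite author's own statement) =====
-- stated objective: alternative
-- what changed: B replaces A's per-ring slicing loop (append each slice, break on empty, reverse, join) by a single character-level forward pass: an online state machine over enumerate(msg) that collects each top segment as the characters stream by and prepends completed segments, building the output back-to-front with no slicing, no break sentinel and no reversal (it keeps A's ring budget 2..9999999).
import Mathlib
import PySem

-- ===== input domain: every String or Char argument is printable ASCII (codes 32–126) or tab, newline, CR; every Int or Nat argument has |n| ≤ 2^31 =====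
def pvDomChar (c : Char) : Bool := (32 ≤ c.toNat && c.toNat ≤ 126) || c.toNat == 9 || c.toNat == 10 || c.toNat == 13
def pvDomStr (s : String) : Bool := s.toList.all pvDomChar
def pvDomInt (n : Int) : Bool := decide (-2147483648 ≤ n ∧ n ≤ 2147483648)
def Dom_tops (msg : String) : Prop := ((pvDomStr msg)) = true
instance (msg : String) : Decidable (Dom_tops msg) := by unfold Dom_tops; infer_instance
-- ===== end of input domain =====

-- B replaces A's per-ring slicing (append, break sentinel, reverse, join) by a single
-- character-level forward pass: an online state machine that collects each top segment as the
-- characters stream by and prepends completed segments, building the output back-to-front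
-- (objective: alternative; same ring budget 2..9999999 as A's range).

-- ===== PORT A =====
-- A's loop 'for i in range(2, 10000000)' with break: fuel = number of remaining iterations.
def topsLoopA (cs : List Char) : Nat → Int → Int → List (List Char) → List (List Char)
  | 0, _, _, r => r
  | fuel+1, i, p, r =>
    let s := p + i + i - 2
    let seg := PySem.List.slice cs (some s) (some (s + i))
    if seg = [] then r ++ [seg]
    else topsLoopA cs fuel (i + 1) (p + i * 4 - 3) (r ++ [seg])

def tops (msg : String) : String :=
  String.ofList ((topsLoopA msg.toList 9999998 2 0 []).reverse.flatten)

-- ===== PORT B =====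
-- Source B's loop body: state (out, seg, j, s), one step per enumerated character.
def topsStepB (st : List Char × List Char × Int × Int) (pc : Int × Char) :
    List Char × List Char × Int × Int :=
  match st, pc with
  | (out, seg, j, s), (p, c) =>
    if s ≤ p ∧ j < 10000000 then
      let seg' := seg ++ [c]
      if p = s + j - 1 then (seg' ++ out, [], j + 1, s + 4 * (j + 1) - 5)
      else (out, seg', j, s)
    else (out, seg, j, s)

def tops_alt (msg : String) : String :=
  let st := (PySem.List.enumerate msg.toList 0).foldl topsStepB ([], [], 2, 2)
  String.ofList (st.2.1 ++ st.1)

-- ===== PRECONDITION & SPEC =====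
def Spec_tops (msg : String) (out : String) : Prop := out = tops_alt msg
instance (msg : String) (out : String) : Decidable (Spec_tops msg out) := by unfold Spec_tops; infer_instance

-- ===== CLAIM (what is proved, stated in full; the proofs are below) =====
def Claim_equal_tops : Prop := ∀ (msg : String), Dom_tops msg → Spec_tops msg (tops msg)

-- ===== LEMMAS AND PROOFS =====

-- proof-side recursion equal to B's foldl (finalised as seg ++ out)
def runB : List Char → Int → List Char → List Char → Int → Int → List Char
  | [], _, out, seg, _, _ => seg ++ out
  | c :: t, p, out, seg, j, s =>
    if s ≤ p ∧ j < 10000000 then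
      if p = s + j - 1 then runB t (p + 1) ((seg ++ [c]) ++ out) [] (j + 1) (s + 4 * (j + 1) - 5)
      else runB t (p + 1) out (seg ++ [c]) j s
    else runB t (p + 1) out seg j s

theorem foldB_eq_runB (l : List Char) : ∀ (p : Int) (out seg : List Char) (j s : Int),
    (((PySem.List.enumerate l p).foldl topsStepB (out, seg, j, s)).2.1
      ++ ((PySem.List.enumerate l p).foldl topsStepB (out, seg, j, s)).1)
      = runB l p out seg j s := by
  induction l with
  | nil => intro p out seg j s; simp [PySem.List.enumerate_nil, runB]
  | cons c t ih =>
    intro p out seg j s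
    rw [PySem.List.enumerate_cons]
    simp only [List.foldl_cons, runB, topsStepB]
    split_ifs with h1 h2 <;> exact ih _ _ _ _ _

-- proof-side ring count: first i ≥ start with 2i²-3i ≥ n
def topsCountGo (n : Int) : Nat → Int → Int
  | 0, i => i
  | k+1, i => if 2 * i * i - 3 * i < n then topsCountGo n k (i + 1) else i

def topsCountB (n : Int) (i : Int) : Int := topsCountGo n (n + 2 - i).toNat i

theorem topsCountB_eq (n i : Int) :
    topsCountB n i = if 2 * i * i - 3 * i < n then topsCountB n (i + 1) else i := by
  unfold topsCountB
  rcases hk : (n + 2 - i).toNat with _ | k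
  · have hcond : ¬ 2 * i * i - 3 * i < n := by
      intro h
      have : i ≤ n + 1 := by nlinarith [sq_nonneg (i - 1), sq_nonneg i]
      omega
    rw [topsCountGo, if_neg hcond]
  · rw [topsCountGo]
    split_ifs with h
    · have : i ≤ n + 1 := by nlinarith [sq_nonneg (i - 1), sq_nonneg i]
      have : (n + 2 - (i + 1)).toNat = k := by omega
      rw [this]
    · rfl

theorem topsCountB_ge (n i : Int) : i ≤ topsCountB n i := by
  rw [topsCountB_eq]
  split
  · have := topsCountB_ge n (i + 1); omega
  · exact le_rfl
termination_by (n + 2 - i).toNat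
decreasing_by
  rename_i h
  have : i ≤ n + 1 := by nlinarith [sq_nonneg (i - 1), sq_nonneg i]
  omega

theorem topsCountB_le (n i j : Int) (hij : i ≤ j) (hn : n ≤ 2 * j * j - 3 * j) :
    topsCountB n i ≤ j := by
  rw [topsCountB_eq]
  split
  · rename_i h
    have hij' : i + 1 ≤ j := by
      rcases lt_or_eq_of_le hij with h' | h'
      · omega
      · subst h'; linarith
    exact topsCountB_le n (i + 1) j hij' hn
  · exact hij
termination_by (n + 2 - i).toNat
decreasing_by
  rename_i h _
  have : i ≤ n + 1 := by nlinarith [sq_nonneg (i - 1), sq_nonneg i]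
  omega

theorem topsCountB_gt (n j : Int) (hj : 2 ≤ j) (hjn : 2 * j * j - 3 * j < n) :
    ∀ i, 2 ≤ i → i ≤ j + 1 → j + 1 ≤ topsCountB n i := by
  intro i hi hij
  rcases lt_or_eq_of_le hij with h' | h'
  · rw [topsCountB_eq, if_pos]
    · exact topsCountB_gt n j hj hjn (i + 1) (by omega) (by omega)
    · have : 2 * i * i - 3 * i ≤ 2 * j * j - 3 * j := by
        nlinarith [mul_nonneg (show (0:Int) ≤ j - i by omega) (show (0:Int) ≤ 2*j + 2*i - 3 by omega)]
      omega
  · subst h'; exact topsCountB_ge n (j + 1)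
termination_by i => (j + 1 - i).toNat
decreasing_by omega

-- the segment of ring j
def segOf (cs : List Char) (j : Int) : List Char :=
  PySem.List.slice cs (some (2 * j * j - 3 * j)) (some (2 * j * j - 3 * j + j))

-- the segments of rings j, j-1, …, lo
def segsDown (cs : List Char) (lo j : Int) : List (List Char) :=
  if lo ≤ j then segOf cs j :: segsDown cs lo (j - 1) else []
termination_by (j - lo + 1).toNat
decreasing_by omega

theorem segsDown_snoc (cs : List Char) (lo j : Int) (h : lo ≤ j) :
    segsDown cs lo j = segsDown cs (lo + 1) j ++ [segOf cs lo] := by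
  conv_lhs => rw [segsDown]
  conv_rhs => rw [segsDown]
  rcases lt_or_eq_of_le h with h' | h'
  · rw [if_pos h, if_pos (by omega), segsDown_snoc cs lo (j - 1) (by omega)]
    simp
  · subst h'
    rw [if_pos le_rfl, if_neg (by omega)]
    rw [segsDown, if_neg (by omega)]
    rfl
termination_by (j - lo).toNat
decreasing_by omega

theorem segOf_empty_iff (cs : List Char) (j : Int) (hj : 2 ≤ j) :
    segOf cs j = [] ↔ (cs.length : Int) ≤ 2 * j * j - 3 * j := by
  have ha : (0:Int) ≤ 2 * j * j - 3 * j := by nlinarith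
  rw [segOf]
  generalize hA : 2 * j * j - 3 * j = a at *
  have hb : (0:Int) ≤ a + j := by omega
  rw [PySem.List.slice_toNat cs ha hb]
  have hk : (a + j).toNat - a.toNat = j.toNat := by omega
  rw [hk]
  simp only [List.take_eq_nil_iff, List.drop_eq_nil_iff]
  omega

theorem slice_snoc (cs : List Char) (a : Int) (q : ℕ) (c : Char) (t : List Char)
    (ha : 0 ≤ a) (haq : a ≤ (q:Int)) (hd : cs.drop q = c :: t) :
    PySem.List.slice cs (some a) (some (q:Int)) ++ [c]
      = PySem.List.slice cs (some a) (some ((q:Int) + 1)) := by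
  have hc : cs[q]? = some c := by
    have h := congrArg (fun l : List Char => l[0]?) hd
    simpa [List.getElem?_drop] using h
  rw [PySem.List.slice_toNat cs ha (by omega), PySem.List.slice_toNat cs ha (by omega)]
  have h1 : ((q:Int) + 1).toNat - a.toNat = ((q:Int).toNat - a.toNat) + 1 := by omega
  rw [h1, List.take_succ]
  have h2 : (cs.drop a.toNat)[(q:Int).toNat - a.toNat]? = some c := by
    rw [List.getElem?_drop]
    have : a.toNat + ((q:Int).toNat - a.toNat) = q := by omega
    rw [this]; exact hc
  rw [h2]; rfl

theorem slice_clamp (cs : List Char) (a b : Int) (ha : 0 ≤ a)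
    (hb : (cs.length : Int) ≤ b) :
    PySem.List.slice cs (some a) (some b)
      = PySem.List.slice cs (some a) (some (cs.length : Int)) := by
  rw [PySem.List.slice_toNat cs ha (by omega), PySem.List.slice_toNat cs ha (by omega)]
  rw [List.take_of_length_le (by rw [List.length_drop]; omega),
      List.take_of_length_le (by rw [List.length_drop]; omega)]

theorem runB_dead (l : List Char) : ∀ (p : Int) (out seg : List Char) (j s : Int),
    10000000 ≤ j → runB l p out seg j s = seg ++ out := by
  induction l with
  | nil => intro p out seg j s h; rfl
  | cons c t ih =>
    intro p out seg j s h
    simp only [runB]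
    rw [if_neg (by omega)]
    exact ih _ _ _ _ _ h

mutual
theorem runB_between (cs : List Char) (q : ℕ) (out : List Char) (j : Int)
    (hj : 2 ≤ j) (hq : (q:Int) ≤ 2*j*j - 3*j) :
    runB (cs.drop q) q out [] j (2*j*j - 3*j)
      = (segsDown cs j (min (topsCountB (cs.length:Int) 2) 10000000 - 1)).flatten ++ out := by
  rcases hd : cs.drop q with _ | ⟨c, t⟩
  · have hlen : cs.length ≤ q := List.drop_eq_nil_iff.mp hd
    have hC : topsCountB (cs.length:Int) 2 ≤ j :=
      topsCountB_le _ 2 j (by omega) (by push_cast; omega)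
    rw [runB, segsDown, if_neg (by omega)]
    rfl
  · have hqlt : q < cs.length := by
      by_contra h
      have hnil : List.drop q cs = [] := List.drop_eq_nil_iff.mpr (by omega)
      rw [hnil] at hd; exact absurd hd (by simp)
    have ht : cs.drop (q + 1) = t := by
      rw [← List.tail_drop, hd]
      rfl
    simp only [runB]
    by_cases hqs : (q:Int) = 2*j*j - 3*j
    · by_cases hc : j < 10000000
      · rw [if_pos ⟨le_of_eq hqs.symm, hc⟩, if_neg (by omega)]
        have hseg : ([c] : List Char)
            = PySem.List.slice cs (some (2*j*j - 3*j)) (some ((q:Int) + 1)) := by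
          have h0 : PySem.List.slice cs (some (2*j*j-3*j)) (some ((q:Int))) = [] := by
            rw [PySem.List.slice_toNat cs (by nlinarith) (by omega)]
            have key : (q:Int).toNat - (2*j*j-3*j).toNat = 0 := by
              rw [hqs]; exact Nat.sub_self _
            rw [key]; simp
          have := slice_snoc cs (2*j*j-3*j) q c t (by nlinarith) (by omega) hd
          rw [h0] at this; simpa using this
        have := runB_mid cs (q + 1) out [c] j hj hc
          (by push_cast; omega) (by push_cast; omega)
          (by push_cast at hqs ⊢; omega)
          (by rw [hseg]; push_cast; ring_nf) (by omega)
        rw [ht] at this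
        have hq1 : ((q+1 : ℕ) : Int) = (q:Int) + 1 := by push_cast; ring
        rw [hq1] at this
        simpa using this
      · rw [if_neg (by push_neg; intro _; omega)]
        rw [runB_dead t _ _ _ _ _ (by omega)]
        have hC : min (topsCountB (cs.length:Int) 2) 10000000 ≤ j := by
          have := min_le_right (topsCountB (cs.length:Int) 2) 10000000
          omega
        rw [segsDown, if_neg (by omega)]
        rfl
    · rw [if_neg (by push_neg; intro h; omega)]
      have := runB_between cs (q + 1) out j hj (by push_cast; omega)
      rw [ht] at this
      have hq1 : ((q+1 : ℕ) : Int) = (q:Int) + 1 := by push_cast; ring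
      rw [hq1] at this
      simpa using this
termination_by cs.length - q
decreasing_by all_goals omega

theorem runB_mid (cs : List Char) (q : ℕ) (out seg : List Char) (j : Int)
    (hj : 2 ≤ j) (hcap : j < 10000000)
    (h1 : 2*j*j - 3*j < (q:Int)) (h2 : (q:Int) < 2*j*j - 3*j + j)
    (hsn : 2*j*j - 3*j < (cs.length:Int))
    (hseg : seg = PySem.List.slice cs (some (2*j*j - 3*j)) (some (q:Int)))
    (hqn : q ≤ cs.length) :
    runB (cs.drop q) q out seg j (2*j*j - 3*j)
      = (segsDown cs j (min (topsCountB (cs.length:Int) 2) 10000000 - 1)).flatten ++ out := by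
  rcases hd : cs.drop q with _ | ⟨c, t⟩
  · have hlen : cs.length ≤ q := List.drop_eq_nil_iff.mp hd
    have hqe : (q:Int) = (cs.length:Int) := by omega
    have hC : topsCountB (cs.length:Int) 2 = j + 1 := by
      have hge := topsCountB_gt (cs.length:Int) j hj hsn 2 (by omega) (by omega)
      have hle := topsCountB_le (cs.length:Int) 2 (j+1) (by omega)
        (by nlinarith)
      omega
    have hmin : min (topsCountB (cs.length:Int) 2) 10000000 - 1 = j := by omega
    simp only [runB]
    rw [hmin, segsDown, if_pos le_rfl, segsDown, if_neg (by omega)]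
    have : segOf cs j = seg := by
      rw [segOf, slice_clamp cs _ _ (by nlinarith) (by omega), hseg, hqe]
    simp [this]
  · have hqlt : q < cs.length := by
      by_contra h
      have hnil : List.drop q cs = [] := List.drop_eq_nil_iff.mpr (by omega)
      rw [hnil] at hd; exact absurd hd (by simp)
    have ht : cs.drop (q + 1) = t := by
      rw [← List.tail_drop, hd]
      rfl
    simp only [runB]
    rw [if_pos ⟨le_of_lt h1, hcap⟩]
    have hsnoc := slice_snoc cs (2*j*j-3*j) q c t (by nlinarith) (by omega) hd
    by_cases hlast : (q:Int) = 2*j*j - 3*j + j - 1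
    · rw [if_pos hlast]
      have hfull : seg ++ [c] = segOf cs j := by
        rw [hseg, hsnoc, segOf]
        congr 2
        omega
      have hCge : j + 1 ≤ topsCountB (cs.length:Int) 2 :=
        topsCountB_gt (cs.length:Int) j hj hsn 2 (by omega) (by omega)
      have hjmin : j ≤ min (topsCountB (cs.length:Int) 2) 10000000 - 1 := by omega
      have hb := runB_between cs (q + 1) ((seg ++ [c]) ++ out) (j + 1) (by omega)
        (by push_cast; nlinarith)
      rw [ht] at hb
      have harg : 2*j*j - 3*j + 4*(j+1) - 5 = 2*(j+1)*(j+1) - 3*(j+1) := by ring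
      rw [harg]
      rw [show ((q:Int) + 1) = ((q+1 : ℕ) : Int) by push_cast; ring, hb,
          segsDown_snoc cs j _ hjmin, hfull]
      simp
    · rw [if_neg hlast]
      have := runB_mid cs (q + 1) out (seg ++ [c]) j hj hcap
        (by push_cast; omega) (by push_cast; omega) hsn
        (by rw [hseg, hsnoc]; push_cast; ring_nf) (by omega)
      rw [ht] at this
      have hq1 : ((q+1 : ℕ) : Int) = (q:Int) + 1 := by push_cast; ring
      rw [hq1] at this
      simpa using this
termination_by cs.length - q
decreasing_by all_goals omega
end

-- A's loop produces the same flattened descending segments (capped by the remaining fuel)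
theorem loopA_eq (cs : List Char) (fuel : Nat) :
    ∀ (i : Int) (r : List (List Char)), 2 ≤ i →
    (topsLoopA cs fuel i (2*i*i - 5*i + 2) r).reverse.flatten =
      (segsDown cs i (min (topsCountB (cs.length:Int) i) (i + fuel) - 1)).flatten
        ++ r.reverse.flatten := by
  induction fuel with
  | zero =>
    intro i r hi
    have hge := topsCountB_ge (cs.length:Int) i
    have : min (topsCountB (cs.length:Int) i) (i + (0:Nat)) = i := by
      push_cast; omega
    rw [topsLoopA, this, segsDown, if_neg (by omega)]
    rfl
  | succ fuel ih =>
    intro i r hi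
    simp only [topsLoopA]
    have hs : 2*i*i - 5*i + 2 + i + i - 2 = 2*i*i - 3*i := by ring
    rw [hs]
    rw [show PySem.List.slice cs (some (2*i*i - 3*i)) (some (2*i*i - 3*i + i)) = segOf cs i from rfl]
    split_ifs with hseg
    · have hlen : (cs.length:Int) ≤ 2*i*i - 3*i := (segOf_empty_iff cs i hi).mp hseg
      have hcount : topsCountB (cs.length:Int) i = i := by
        rw [topsCountB_eq, if_neg (by omega)]
      have hmin : min (topsCountB (cs.length:Int) i) (i + ((fuel:Nat)+1 : Nat)) = i := by
        rw [hcount]; push_cast; omega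
      rw [hmin, segsDown, if_neg (by omega)]
      simp [hseg]
    · have hlen : 2*i*i - 3*i < (cs.length:Int) := by
        by_contra h
        exact hseg ((segOf_empty_iff cs i hi).mpr (by omega))
      have hcount : topsCountB (cs.length:Int) i = topsCountB (cs.length:Int) (i + 1) := by
        rw [topsCountB_eq, if_pos hlen]
      have hp : 2*i*i - 5*i + 2 + i * 4 - 3 = 2*(i+1)*(i+1) - 5*(i+1) + 2 := by ring
      rw [hp, ih (i + 1) (r ++ [segOf cs i]) (by omega)]
      have hge : i + 1 ≤ topsCountB (cs.length:Int) (i + 1) := topsCountB_ge _ _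
      have hminl : i ≤ min (topsCountB (cs.length:Int) i) (i + ((fuel:Nat)+1 : Nat)) - 1 := by
        rw [hcount]; push_cast; omega
      have hmeq : min (topsCountB (cs.length:Int) (i+1)) ((i+1) + (fuel:Nat))
          = min (topsCountB (cs.length:Int) i) (i + ((fuel:Nat)+1 : Nat)) := by
        rw [hcount]; push_cast; omega
      rw [hmeq, segsDown_snoc cs i _ hminl]
      simp

-- ===== VERDICT (by name: the statement is the Claim_ definition above) =====
theorem tops_spec : Claim_equal_tops := by
  intro msg _
  unfold Spec_tops
  have hB := foldB_eq_runB msg.toList 0 [] [] 2 2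
  have hB2 := runB_between msg.toList 0 [] 2 (by norm_num) (by norm_num)
  simp only [List.drop_zero, Nat.cast_zero] at hB2
  rw [show (2*2*2 - 3*2 : Int) = 2 by norm_num] at hB2
  rw [hB2, List.append_nil] at hB
  have hL : (topsLoopA msg.toList 9999998 2 0 []).reverse.flatten
      = (segsDown msg.toList 2 (min (topsCountB (msg.toList.length:Int) 2) 10000000 - 1)).flatten := by
    rw [show (0:Int) = 2*2*2 - 5*2 + 2 from by norm_num,
        loopA_eq msg.toList 9999998 2 [] (by norm_num)]
    norm_num
  unfold tops tops_alt
  simp only [hL, hB]
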